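-- pv_equiv track=rewrite | github.com/catpasternak/epam-hw | homework07/task02.py | generate_from_str
-- ===== SOURCE A (Python) =====
-- def generate_from_str(string):
--     """Generates characters from given string in reversed order in such a manner,
--     that '#' symboles are not printed and delete letters before them.
--     :param string: input string containing letter and '#' symbols
--     :type string: str
--     """
--     pawn_flag = 0
--     for char in reversed(string):
--         if char == "#":
--             pawn_flag += 1
--         else:
--             if pawn_flag:
--                 pawn_flag -= 1
--             else:
--                 yield char
-- ===== SOURCE B (Python) =====
-- def generate_from_str(string):
--     """Forward one-pass stack: push non-'#' chars, '#' pops the last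
--     surviving char (if any); then yield the stack reversed."""
--     stack = []
--     for char in string:
--         if char == "#":
--             if stack:
--                 stack.pop()
--         else:
--             stack.append(char)
--     yield from reversed(stack)
-- ===== Notes on version B (the rewrite author's own statement) =====
-- stated objective: alternative
-- what changed: Replaces the reversed-iteration pass with a skip counter by a forward push/pop stack (classic backspace processing) whose contents are yielded in reverse at the end.
import Mathlib
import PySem

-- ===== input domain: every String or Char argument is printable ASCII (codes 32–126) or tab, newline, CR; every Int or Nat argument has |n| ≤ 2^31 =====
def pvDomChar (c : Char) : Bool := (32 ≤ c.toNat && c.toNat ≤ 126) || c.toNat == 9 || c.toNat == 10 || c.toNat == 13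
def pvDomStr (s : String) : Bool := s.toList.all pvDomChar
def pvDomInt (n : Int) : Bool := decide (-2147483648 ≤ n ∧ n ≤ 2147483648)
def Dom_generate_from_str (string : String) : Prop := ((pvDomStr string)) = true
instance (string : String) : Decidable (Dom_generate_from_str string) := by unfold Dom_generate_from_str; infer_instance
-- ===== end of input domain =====

-- ===== PORT A =====
-- A's loop: iterate over reversed(string) keeping the '#' counter, yield otherwise
def pvALoop (k : Nat) (l : List Char) : List String :=
  match l with
  | [] => []
  | c :: rest =>
    if c = '#' then pvALoop (k + 1) rest
    else if k ≠ 0 then pvALoop (k - 1) rest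
    else c.toString :: pvALoop k rest

def generate_from_str (string : String) : List String :=
  pvALoop 0 string.toList.reverse

-- ===== PORT B =====
-- B: forward stack; '#' pops the last element if any (dropLast [] = []), then reverse
def pvStep (st : List Char) (c : Char) : List Char :=
  if c = '#' then st.dropLast else st ++ [c]

def generate_from_str_alt (string : String) : List String :=
  ((string.toList.foldl pvStep []).reverse).map (fun c => c.toString)

-- ===== PRECONDITION & SPEC =====
def Spec_generate_from_str (string : String) (out : List String) : Prop := out = generate_from_str_alt string
instance (string : String) (out : List String) : Decidable (Spec_generate_from_str string out) := by unfold Spec_generate_from_str; infer_instance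

-- ===== CLAIM (what is proved, stated in full; the proofs are below) =====
def Claim_equal_generate_from_str : Prop := ∀ (string : String), Dom_generate_from_str string → Spec_generate_from_str string (generate_from_str string)

-- ===== LEMMAS AND PROOFS =====
lemma pvALoop_stack (l : List Char) : ∀ (k : Nat),
    pvALoop k l =
      (((l.reverse.foldl pvStep []).take ((l.reverse.foldl pvStep []).length - k)).reverse).map
        (fun c => c.toString) := by
  induction l with
  | nil => intro k; simp [pvALoop]
  | cons c rest ih =>
    intro k
    have hfold : (c :: rest).reverse.foldl pvStep [] = pvStep (rest.reverse.foldl pvStep []) c := by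
      simp [List.foldl_append]
    set st := rest.reverse.foldl pvStep [] with hst
    by_cases hc : c = '#'
    · have h1 : pvALoop k (c :: rest) = pvALoop (k + 1) rest := by
        simp [pvALoop, hc]
      rw [h1, ih (k + 1), hfold]
      have hstep : pvStep st '#' = st.take (st.length - 1) := by
        simp [pvStep, List.dropLast_eq_take]
      rw [hc, hstep]
      have hlen : (st.take (st.length - 1)).length = st.length - 1 := by
        simp
      rw [hlen, List.take_take,
        Nat.min_eq_left (by omega : st.length - 1 - k ≤ st.length - 1)]
      have hsub : st.length - 1 - k = st.length - (k + 1) := by omega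
      rw [hsub]
    · by_cases hk : k = 0
      · have h1 : pvALoop k (c :: rest) = c.toString :: pvALoop 0 rest := by
          simp [pvALoop, hc, hk]
        rw [h1, ih 0, hfold]
        have hstep : pvStep st c = st ++ [c] := by simp [pvStep, hc]
        rw [hstep]
        simp [hk, List.take_of_length_le]
      · have h1 : pvALoop k (c :: rest) = pvALoop (k - 1) rest := by
          simp [pvALoop, hc, hk]
        rw [h1, ih (k - 1), hfold]
        have hstep : pvStep st c = st ++ [c] := by simp [pvStep, hc]
        rw [hstep]
        have h2 : (st ++ [c]).take ((st ++ [c]).length - k) = st.take (st.length - (k - 1)) := by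
          have hle : (st ++ [c]).length - k ≤ st.length := by simp; omega
          rw [List.take_append_of_le_length hle]
          congr 1
          simp
          omega
        rw [h2]

-- ===== VERDICT (by name: the statement is the Claim_ definition above) =====
theorem generate_from_str_spec : Claim_equal_generate_from_str := by
  intro string _
  unfold Spec_generate_from_str generate_from_str generate_from_str_alt
  rw [pvALoop_stack string.toList.reverse 0]
  simp
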